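-- pv_equiv track=rewrite | github.com/vishnuvardhanreddy31/GFG_POTD_SOLUTIONS | FEBRUARY/28-02-2024.py | DivisibleByEight
-- ===== SOURCE A (Python) =====
-- def DivisibleByEight(s):
--     # Remove non-numeric characters from the string
--     s = ''.join(c for c in s if c.isdigit())
--
--     # Check if the cleaned string is empty
--     if not s:
--         return -1  # If the string becomes empty after removing non-numeric characters, it's not divisible by 8
--
--     # Check if the entire string is less than 4 digits
--     if len(s) < 4:
--         if int(s) % 8 == 0:
--             return 1  # divisible by 8
--         else:
--             return -1  # not divisible by 8
--     else:
--         # Check the last three digits of the cleaned string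
--         num = int(s[-3:])
--         if num == 0 or num % 8 == 0:
--             return 1  # divisible by 8
--         else:
--             return -1  # not divisible by 8
-- ===== SOURCE B (Python) =====
-- def DivisibleByEight(s):
--     # Strip non-digits exactly as A does
--     s = ''.join(c for c in s if c.isdigit())
--     if not s:
--         return -1
--     # Single pass: incremental remainder modulo 8
--     r = 0
--     for c in s:
--         r = (r * 10 + int(c)) % 8
--     return 1 if r == 0 else -1
-- ===== Notes on version B (the rewrite author's own statement) =====
-- stated objective: alternative
-- what changed: Replaces A's last-three-digits shortcut (slice, int() of the slice, length-based branching) with a single left-to-right pass maintaining the running remainder modulo 8.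
import Mathlib
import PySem

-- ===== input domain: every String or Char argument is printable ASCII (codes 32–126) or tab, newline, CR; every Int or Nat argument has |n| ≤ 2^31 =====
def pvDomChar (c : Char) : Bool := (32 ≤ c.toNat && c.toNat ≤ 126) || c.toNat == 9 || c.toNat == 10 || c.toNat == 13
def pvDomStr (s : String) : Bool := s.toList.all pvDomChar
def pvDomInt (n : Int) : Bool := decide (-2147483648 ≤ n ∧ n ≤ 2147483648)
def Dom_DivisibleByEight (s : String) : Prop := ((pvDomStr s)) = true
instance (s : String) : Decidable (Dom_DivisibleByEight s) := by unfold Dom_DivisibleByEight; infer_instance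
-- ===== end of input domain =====

-- B replaces A's last-three-digits shortcut with a single pass keeping a running remainder mod 8 (alternative, same value everywhere).

-- ===== PORT A =====
-- int() on a nonempty digits-only string: exact at A's two call sites, where the
-- argument is built from filtered digit characters only (no sign/whitespace/underscore).
def pvDigitsInt (ds : List Char) : Int := ds.foldl (fun a c => a * 10 + ((c.toNat : Int) - 48)) 0

def DivisibleByEight (s : String) : Int :=
  let ds := s.toList.filter PySem.Chars.isdigit
  if ds = [] then -1
  else if ds.length < 4 then
    if PySem.Int.mod (pvDigitsInt ds) 8 = 0 then 1 else -1
  else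
    let num := pvDigitsInt (PySem.List.slice ds (some (-3)) none)
    if num = 0 ∨ PySem.Int.mod num 8 = 0 then 1 else -1

-- ===== PORT B =====
def DivisibleByEight_alt (s : String) : Int :=
  let ds := s.toList.filter PySem.Chars.isdigit
  if ds = [] then -1
  else if ds.foldl (fun r c => PySem.Int.mod (r * 10 + ((c.toNat : Int) - 48)) 8) 0 = 0
    then 1 else -1

-- ===== PRECONDITION & SPEC =====
def Spec_DivisibleByEight (s : String) (out : Int) : Prop := out = DivisibleByEight_alt s
instance (s : String) (out : Int) : Decidable (Spec_DivisibleByEight s out) := by unfold Spec_DivisibleByEight; infer_instance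

-- ===== CLAIM (what is proved, stated in full; the proofs are below) =====
def Claim_equal_DivisibleByEight : Prop := ∀ (s : String), Dom_DivisibleByEight s → Spec_DivisibleByEight s (DivisibleByEight s)

-- ===== LEMMAS AND PROOFS =====

-- B's modular fold computes the value-fold's remainder mod 8.
theorem pvFoldMod (cs : List Char) (r : Int) :
    cs.foldl (fun r c => PySem.Int.mod (r * 10 + ((c.toNat : Int) - 48)) 8) (r % 8)
      = (cs.foldl (fun a c => a * 10 + ((c.toNat : Int) - 48)) r) % 8 := by
  have hf : (fun (r : Int) (c : Char) => PySem.Int.mod (r * 10 + ((c.toNat : Int) - 48)) 8)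
      = fun r c => (r * 10 + ((c.toNat : Int) - 48)) % 8 := by
    funext r c; exact PySem.Int.mod_eq_emod_of_pos (by norm_num)
  rw [hf]
  induction cs generalizing r with
  | nil => rfl
  | cons c cs ih =>
    simp only [List.foldl_cons]
    have h : ((r % 8) * 10 + ((c.toNat : Int) - 48)) % 8
        = (r * 10 + ((c.toNat : Int) - 48)) % 8 := by omega
    rw [h]; exact ih _

-- value-fold from an arbitrary accumulator
theorem pvValFrom (cs : List Char) (a : Int) :
    cs.foldl (fun a c => a * 10 + ((c.toNat : Int) - 48)) a
      = a * 10 ^ cs.length + pvDigitsInt cs := by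
  induction cs generalizing a with
  | nil => simp [pvDigitsInt]
  | cons c cs ih =>
    simp only [List.foldl_cons, pvDigitsInt] at *
    rw [ih (a * 10 + ((c.toNat : Int) - 48)), ih ((0:Int) * 10 + ((c.toNat : Int) - 48))]
    simp [List.length_cons, pow_succ]
    ring

theorem pvSliceLast3 (ds : List Char) :
    PySem.List.slice ds (some (-3)) none = ds.drop (ds.length - 3) := by
  simp [PySem.List.slice]

-- mod 8 of the whole digit string equals mod 8 of its last three digits (when ≥ 3 digits)
theorem pvLast3Mod (ds : List Char) (h : 3 ≤ ds.length) :
    pvDigitsInt ds % 8 = pvDigitsInt (ds.drop (ds.length - 3)) % 8 := by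
  have hsplit : ds = ds.take (ds.length - 3) ++ ds.drop (ds.length - 3) :=
    (List.take_append_drop _ _).symm
  have hlen : (ds.drop (ds.length - 3)).length = 3 := by
    simp [List.length_drop]; omega
  calc pvDigitsInt ds % 8
      = ((ds.take (ds.length - 3) ++ ds.drop (ds.length - 3)).foldl
          (fun a c => a * 10 + ((c.toNat : Int) - 48)) 0) % 8 := by rw [← hsplit]; rfl
    _ = ((ds.drop (ds.length - 3)).foldl (fun a c => a * 10 + ((c.toNat : Int) - 48))
          (pvDigitsInt (ds.take (ds.length - 3)))) % 8 := by
          rw [List.foldl_append]; rfl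
    _ = (pvDigitsInt (ds.take (ds.length - 3)) * 10 ^ 3
          + pvDigitsInt (ds.drop (ds.length - 3))) % 8 := by rw [pvValFrom, hlen]
    _ = pvDigitsInt (ds.drop (ds.length - 3)) % 8 := by
          set k := pvDigitsInt (ds.take (ds.length - 3))
          set v := pvDigitsInt (ds.drop (ds.length - 3))
          have : k * 10 ^ 3 = k * 1000 := by norm_num
          rw [this]; omega

-- ===== VERDICT (by name: the statement is the Claim_ definition above) =====
theorem DivisibleByEight_spec : Claim_equal_DivisibleByEight := by
  intro s _
  unfold Spec_DivisibleByEight DivisibleByEight DivisibleByEight_alt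
  set ds := s.toList.filter PySem.Chars.isdigit with hds
  by_cases hnil : ds = []
  · simp [hnil]
  · simp only [hnil, if_false]
    have hfold : ds.foldl (fun r c => PySem.Int.mod (r * 10 + ((c.toNat : Int) - 48)) 8) 0
        = pvDigitsInt ds % 8 := by
      have := pvFoldMod ds 0
      simpa [pvDigitsInt] using this
    have hmodA : ∀ x : Int, PySem.Int.mod x 8 = x % 8 := fun x =>
      PySem.Int.mod_eq_emod_of_pos (by norm_num)
    by_cases hlen : ds.length < 4
    · simp only [hlen, if_true]
      rw [hfold, hmodA]
    · simp only [hlen, if_false]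
      rw [pvSliceLast3]
      have h3 : 3 ≤ ds.length := by omega
      have hkey := pvLast3Mod ds h3
      set num := pvDigitsInt (ds.drop (ds.length - 3)) with hnum
      have hcond : (num = 0 ∨ PySem.Int.mod num 8 = 0) ↔ (pvDigitsInt ds % 8 = 0) := by
        rw [hkey, hmodA]
        constructor
        · rintro (h | h) <;> omega
        · intro h; exact Or.inr h
      rw [hfold]
      split_ifs with h1 h2 h2
      · rfl
      · exact absurd (hcond.mp h1) h2
      · exact absurd (hcond.mpr h2) h1
      · rfl
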